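-- pv_equiv track=rewrite | github.com/oernster/trainer | src/core/services/route_service.py | _are_same_station
-- ===== SOURCE A (Python) =====
-- def _are_same_station(station1: str, station2: str) -> bool:
--     """Check if two station names refer to the same station."""
--     # Normalize station names for comparison
--     def normalize(name):
--         return name.lower().replace(" ", "").replace("-", "").replace("(", "").replace(")", "")
--
--     norm1 = normalize(station1)
--     norm2 = normalize(station2)
--
--     # Exact match
--     if norm1 == norm2:
--         return True
--
--     # Common variations
--     variations = [
--         ("central", ""),
--         ("main", ""),
--         ("parkway", ""),
--         ("international", ""),
--     ]
--
--     for var1, var2 in variations: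
--         if norm1.replace(var1, var2) == norm2 or norm1 == norm2.replace(var1, var2):
--             return True
--
--     return False
-- ===== SOURCE B (Python) =====
-- def _are_same_station(station1: str, station2: str) -> bool:
--     """Check if two station names refer to the same station."""
--     def normalize(name):
--         return ''.join(c for c in name.lower() if c not in ' -()')
--
--     def strips(s, t, w):
--         # True iff s with every occurrence of w deleted (left-to-right) equals t,
--         # via a streaming two-pointer scan: no replaced string is ever built.
--         i = j = 0
--         while i < len(s):
--             if w and s.startswith(w, i):
--                 i += len(w)
--             elif j < len(t) and s[i] == t[j]:
--                 i += 1
--                 j += 1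
--             else:
--                 return False
--         return j == len(t)
--
--     norm1 = normalize(station1)
--     norm2 = normalize(station2)
--     if norm1 == norm2:
--         return True
--     for w in ("central", "main", "parkway", "international"):
--         if strips(norm1, norm2, w) or strips(norm2, norm1, w):
--             return True
--     return False
-- ===== Notes on version B (the rewrite author's own statement) =====
-- stated objective: alternative
-- what changed: Normalization is one filtering pass over the lowered string instead of four chained replace passes, and 'norm2 equals norm1 with word w deleted' is decided by a streaming two-pointer recursive matcher that never materializes any replaced string, instead of building norm.replace(w,'') and comparing.
import Mathlib
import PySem

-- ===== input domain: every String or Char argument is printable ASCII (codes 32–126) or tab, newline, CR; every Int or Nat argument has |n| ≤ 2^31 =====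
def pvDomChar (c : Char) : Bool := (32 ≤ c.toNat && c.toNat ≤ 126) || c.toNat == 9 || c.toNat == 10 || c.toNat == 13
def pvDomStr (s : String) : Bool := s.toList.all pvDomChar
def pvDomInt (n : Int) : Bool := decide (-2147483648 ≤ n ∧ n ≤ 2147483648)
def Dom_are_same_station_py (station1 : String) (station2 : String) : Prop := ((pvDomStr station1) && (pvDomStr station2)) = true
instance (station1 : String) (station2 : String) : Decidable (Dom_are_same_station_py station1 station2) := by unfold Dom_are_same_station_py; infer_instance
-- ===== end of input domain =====

-- B normalizes in a single filtering pass over the lowered string and tests "equal after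
-- deleting one word" with a streaming two-pointer matcher that builds no replaced strings
-- (objective: alternative algorithm); return values proved equal on all inputs.


-- ===== PORT A =====
-- name.lower().replace(" ","").replace("-","").replace("(","").replace(")","")
def pvNormalize (name : String) : String :=
  PySem.Str.replace (PySem.Str.replace (PySem.Str.replace
    (PySem.Str.replace (PySem.Str.lower name) " " "") "-" "") "(" "") ")" ""

def are_same_station_py (station1 : String) (station2 : String) : Bool :=
  let norm1 := pvNormalize station1
  let norm2 := pvNormalize station2
  if norm1 == norm2 then true
  else
    let variations : List (String × String) :=
      [("central", ""), ("main", ""), ("parkway", ""), ("international", "")]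
    -- for-loop with early 'return True' = any over the list
    variations.any (fun p =>
      PySem.Str.replace norm1 p.1 p.2 == norm2 || norm1 == PySem.Str.replace norm2 p.1 p.2)

-- ===== PORT B =====
-- ''.join(c for c in name.lower() if c not in ' -()')  — one filtering pass
def pvNormB (name : String) : String :=
  String.ofList ((PySem.Str.lower name).toList.filter (fun c => !([' ', '-', '(', ')'].contains c)))

-- strips s t w: True iff s with every occurrence of w deleted (left-to-right) equals t,
-- Source B's two-pointer while loop as the obvious structural recursion on the char lists
def pvStrips : List Char → List Char → List Char → Bool
  | [], t, _ => t.isEmpty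
  | c :: rest, t, w =>
    if w ≠ [] ∧ PySem.Chars.startswith (c :: rest) w then
      pvStrips ((c :: rest).drop w.length) t w
    else
      match t with
      | [] => false
      | d :: ts => if c == d then pvStrips rest ts w else false
termination_by s _ _ => s.length
decreasing_by
  · rename_i h
    have hw : 0 < w.length := List.length_pos_of_ne_nil h.1
    simp [List.length_drop]; omega
  · simp

def are_same_station_py_alt (station1 : String) (station2 : String) : Bool :=
  let norm1 := pvNormB station1
  let norm2 := pvNormB station2
  if norm1 == norm2 then true
  else
    (["central", "main", "parkway", "international"] : List String).any (fun w =>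
      pvStrips norm1.toList norm2.toList w.toList || pvStrips norm2.toList norm1.toList w.toList)

-- ===== PRECONDITION & SPEC =====
def Spec_are_same_station_py (station1 : String) (station2 : String) (out : Bool) : Prop := out = are_same_station_py_alt station1 station2
instance (station1 : String) (station2 : String) (out : Bool) : Decidable (Spec_are_same_station_py station1 station2 out) := by unfold Spec_are_same_station_py; infer_instance

-- ===== CLAIM (what is proved, stated in full; the proofs are below) =====
def Claim_equal_are_same_station_py : Prop := ∀ (station1 : String) (station2 : String), Dom_are_same_station_py station1 station2 → Spec_are_same_station_py station1 station2 (are_same_station_py station1 station2)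

-- ===== LEMMAS AND PROOFS =====

-- proof-only recursive form of Chars.replace with empty replacement (deletion)
def pvDel (w : List Char) : List Char → List Char
  | [] => []
  | c :: rest =>
    if w ≠ [] ∧ PySem.Chars.startswith (c :: rest) w then
      pvDel w ((c :: rest).drop w.length)
    else c :: pvDel w rest
termination_by s => s.length
decreasing_by
  · rename_i h
    have hw : 0 < w.length := List.length_pos_of_ne_nil h.1
    simp [List.length_drop]; omega
  · simp

lemma go_eq_del (w : List Char) (hw : w ≠ []) :
    ∀ (fuel : Nat) (l acc : List Char), l.length ≤ fuel →
      PySem.Chars.replace.go w [] fuel l acc = acc.reverse ++ pvDel w l := by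
  intro fuel
  induction fuel with
  | zero =>
      intro l acc hl
      have : l = [] := by cases l <;> simp_all
      subst this
      simp [PySem.Chars.replace.go, pvDel]
  | succ n ih =>
      intro l acc hl
      cases l with
      | nil => simp [PySem.Chars.replace.go, pvDel]
      | cons c rest =>
        by_cases hp : w.isPrefixOf (c :: rest)
        · have hw1 : 0 < w.length := List.length_pos_of_ne_nil hw
          have hlen : ((c :: rest).drop w.length).length ≤ n := by
            simp [List.length_drop]; simp at hl; omega
          rw [PySem.Chars.replace.go, if_pos hp]
          rw [ih _ _ hlen]
          rw [pvDel, if_pos ⟨hw, by simp [PySem.Chars.startswith, hp]⟩]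
          simp
        · rw [PySem.Chars.replace.go, if_neg hp]
          rw [ih _ _ (by simp at hl ⊢; omega)]
          rw [pvDel, if_neg (by simp [PySem.Chars.startswith, hp])]
          simp
  
lemma replace_empty_eq_del (l w : List Char) (hw : w ≠ []) :
    PySem.Chars.replace l w [] = pvDel w l := by
  rw [PySem.Chars.replace, if_neg (by simp [hw]), go_eq_del w hw l.length l [] (le_refl _)]
  simp

lemma del_singleton (c : Char) (l : List Char) :
    pvDel [c] l = l.filter (fun d => !(d == c)) := by
  induction l using pvDel.induct (w := [c]) with
  | case1 => simp [pvDel]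
  | case2 d rest h ih =>
      have hp : c = d := by simpa [PySem.Chars.startswith, List.isPrefixOf] using h.2
      subst hp
      rw [pvDel, if_pos h]
      simpa using ih
  | case3 d rest h ih =>
      rw [pvDel, if_neg h]
      have hdc : ¬ (d = c) := by
        intro he; exact h ⟨by simp, by simp [PySem.Chars.startswith, List.isPrefixOf, he]⟩
      simp [hdc, ih]

lemma strips_eq_del (s t w : List Char) :
    pvStrips s t w = (pvDel w s == t) := by
  induction s, t, w using pvStrips.induct with
  | case1 t w => cases t <;> simp [pvStrips, pvDel]
  | case2 c rest t w h ih =>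
      rw [pvStrips.eq_def]; simp only []; rw [if_pos h, pvDel, if_pos h, ih]
  | case3 c rest w h =>
      rw [pvStrips.eq_def]; simp only []; rw [if_neg h, pvDel, if_neg h]
      simp
  | case4 c rest w h d ts hcd ih =>
      rw [pvStrips.eq_def]; simp only []; rw [if_neg h, pvDel, if_neg h]
      simp only [List.cons_beq_cons, hcd, Bool.true_and]
      simpa [show c = d from by simpa using hcd] using ih
  | case5 c rest w h d ts hcd =>
      rw [pvStrips.eq_def]; simp only []; rw [if_neg h, pvDel, if_neg h]
      simp only [List.cons_beq_cons, hcd]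
      simp

lemma str_beq_toList (a b : String) : (a == b) = (a.toList == b.toList) := by
  by_cases h : a = b
  · simp [h]
  · have : ¬ (a.toList = b.toList) := fun he => h (by
      have := congrArg String.ofList he; simpa using this)
    simp [h, this]

lemma norm_eq (s : String) : pvNormalize s = pvNormB s := by
  have h1 : (' ' :: []) ≠ ([] : List Char) := by simp
  rw [pvNormalize, pvNormB]
  simp only [PySem.Str.replace, PySem.Str.toList_lower]
  have tl : ∀ l : List Char, (String.ofList l).toList = l := by simp
  rw [tl, tl, tl]
  rw [show (" ".toList) = [' '] from rfl, show ("-".toList) = ['-'] from rfl,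
      show ("(".toList) = ['('] from rfl, show (")".toList) = [')'] from rfl,
      show ("".toList) = ([] : List Char) from rfl]
  rw [replace_empty_eq_del _ _ (by simp), replace_empty_eq_del _ _ (by simp),
      replace_empty_eq_del _ _ (by simp), replace_empty_eq_del _ _ (by simp)]
  rw [del_singleton, del_singleton, del_singleton, del_singleton]
  rw [List.filter_filter, List.filter_filter, List.filter_filter]
  congr 1
  apply List.filter_congr
  intro c _
  by_cases h1 : c = ' ' <;> by_cases h2 : c = '-' <;> by_cases h3 : c = '(' <;>
    by_cases h4 : c = ')' <;> simp_all

lemma pair_eq (n1 n2 w : String) (hw : w.toList ≠ []) :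
    (PySem.Str.replace n1 w "" == n2 || n1 == PySem.Str.replace n2 w "")
      = (pvStrips n1.toList n2.toList w.toList || pvStrips n2.toList n1.toList w.toList) := by
  rw [strips_eq_del, strips_eq_del,
      str_beq_toList (PySem.Str.replace n1 w "") n2, str_beq_toList n1 (PySem.Str.replace n2 w "")]
  rw [PySem.Str.toList_replace, PySem.Str.toList_replace,
      show ("".toList) = ([] : List Char) from rfl,
      replace_empty_eq_del _ _ hw, replace_empty_eq_del _ _ hw]
  congr 1
  exact BEq.comm

-- ===== VERDICT (by name: the statement is the Claim_ definition above) =====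
theorem are_same_station_py_spec : Claim_equal_are_same_station_py := by
  intro s1 s2 _
  show are_same_station_py s1 s2 = are_same_station_py_alt s1 s2
  rw [are_same_station_py, are_same_station_py_alt]
  simp only [← norm_eq s1, ← norm_eq s2]
  by_cases h : pvNormalize s1 == pvNormalize s2
  · simp [h]
  · simp only [h, Bool.false_eq_true, List.any_cons, List.any_nil]
    rw [pair_eq _ _ "central" (by decide), pair_eq _ _ "main" (by decide),
        pair_eq _ _ "parkway" (by decide), pair_eq _ _ "international" (by decide)]
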